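-- pv_equiv track=rewrite | github.com/general-sir/debug_project | main.py | generate_leg_set
-- ===== SOURCE A (Python) =====
-- def generate_leg_set(right=False, left=False, odd=False, even=False, front=False, mid=False, rear=False):
--     if not right and not left and not odd and not even and not front and not mid and not rear:
--         return list(range(6))
--     right_set = {0, 1, 2}
--     left_set = {3, 4, 5}
--     odd_set = {1, 3, 5}
--     even_set = {0, 2, 4}
--     front_set = {0, 5}
--     mid_set = {1, 4}
--     rear_set = {2, 3}
--     and_list = []
--     if right:
--         and_list.append(right_set)
--     if left:
--         and_list.append(left_set)
--     if odd:
--         and_list.append(odd_set)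
--     if even:
--         and_list.append(even_set)
--     if front:
--         and_list.append(front_set)
--     if mid:
--         and_list.append(mid_set)
--     if rear:
--         and_list.append(rear_set)
--
--     ret_set = and_list[0]
--     for curr_set in and_list[1:]:
--         ret_set &= curr_set
--
--     return sorted(ret_set)
-- ===== SOURCE B (Python) =====
-- def generate_leg_set(right=False, left=False, odd=False, even=False, front=False, mid=False, rear=False):
--     sets = [(right, {0, 1, 2}), (left, {3, 4, 5}), (odd, {1, 3, 5}), (even, {0, 2, 4}),
--             (front, {0, 5}), (mid, {1, 4}), (rear, {2, 3})]
--     active = [s for flag, s in sets if flag]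
--     return [i for i in range(6) if all(i in s for s in active)]
-- ===== Notes on version B (the rewrite author's own statement) =====
-- stated objective: simpler
-- what changed: Replaces the special-cased no-flags branch and the reduce-style set intersection (with sorted() at the end) by a single per-leg filter over range(6): a leg is kept iff it belongs to every active flag's set, which handles the empty case automatically and needs no sort.
import Mathlib
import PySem

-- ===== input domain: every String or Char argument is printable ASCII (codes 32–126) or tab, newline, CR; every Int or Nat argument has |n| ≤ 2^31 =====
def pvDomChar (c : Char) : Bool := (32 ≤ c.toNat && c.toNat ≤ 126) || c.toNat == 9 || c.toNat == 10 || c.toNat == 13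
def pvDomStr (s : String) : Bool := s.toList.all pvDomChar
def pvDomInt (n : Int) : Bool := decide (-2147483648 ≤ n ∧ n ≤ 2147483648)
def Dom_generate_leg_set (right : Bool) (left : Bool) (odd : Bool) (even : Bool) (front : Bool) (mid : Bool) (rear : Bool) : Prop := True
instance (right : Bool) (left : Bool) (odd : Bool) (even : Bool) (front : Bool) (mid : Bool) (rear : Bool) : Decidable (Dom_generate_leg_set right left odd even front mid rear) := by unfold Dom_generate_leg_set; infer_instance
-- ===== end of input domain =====

-- B replaces the no-flags special case + set-intersection reduce + sorted() by one per-leg filter over range(6) (simpler decomposition).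


-- ===== PORT A =====
-- literal port of A: early return for no flags, collect active sets, reduce by &, sorted()
def generate_leg_set (right : Bool) (left : Bool) (odd : Bool) (even : Bool) (front : Bool) (mid : Bool) (rear : Bool) : List Int :=
  if !right && !left && !odd && !even && !front && !mid && !rear then
    PySem.List.pyRange 0 6 1
  else
    let right_set : PySem.Set Int := PySem.Set.ofList [0, 1, 2]
    let left_set : PySem.Set Int := PySem.Set.ofList [3, 4, 5]
    let odd_set : PySem.Set Int := PySem.Set.ofList [1, 3, 5]
    let even_set : PySem.Set Int := PySem.Set.ofList [0, 2, 4]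
    let front_set : PySem.Set Int := PySem.Set.ofList [0, 5]
    let mid_set : PySem.Set Int := PySem.Set.ofList [1, 4]
    let rear_set : PySem.Set Int := PySem.Set.ofList [2, 3]
    let and_list : List (PySem.Set Int) := []
    let and_list := if right then and_list ++ [right_set] else and_list
    let and_list := if left then and_list ++ [left_set] else and_list
    let and_list := if odd then and_list ++ [odd_set] else and_list
    let and_list := if even then and_list ++ [even_set] else and_list
    let and_list := if front then and_list ++ [front_set] else and_list
    let and_list := if mid then and_list ++ [mid_set] else and_list
    let and_list := if rear then and_list ++ [rear_set] else and_list
    -- and_list[0]: the guard above makes and_list nonempty, so pyGet? returns some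
    let ret_set : PySem.Set Int := (PySem.List.pyGet? and_list 0).getD []
    -- for curr_set in and_list[1:]: ret_set &= curr_set
    let ret_set := (PySem.List.slice and_list (some 1) none).foldl PySem.Set.inter ret_set
    PySem.List.sorted ret_set (fun x => x) false

-- ===== PORT B =====
-- port of B: keep leg i of range(6) iff i is in every active flag's set
def generate_leg_set_alt (right : Bool) (left : Bool) (odd : Bool) (even : Bool) (front : Bool) (mid : Bool) (rear : Bool) : List Int :=
  let sets : List (Bool × PySem.Set Int) :=
    [(right, PySem.Set.ofList [0, 1, 2]), (left, PySem.Set.ofList [3, 4, 5]),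
     (odd, PySem.Set.ofList [1, 3, 5]), (even, PySem.Set.ofList [0, 2, 4]),
     (front, PySem.Set.ofList [0, 5]), (mid, PySem.Set.ofList [1, 4]),
     (rear, PySem.Set.ofList [2, 3])]
  let active : List (PySem.Set Int) := (sets.filter (fun p => p.1)).map (fun p => p.2)
  (PySem.List.pyRange 0 6 1).filter (fun i => active.all (fun s => PySem.Set.contains s i))

-- ===== PRECONDITION & SPEC =====
def Spec_generate_leg_set (right : Bool) (left : Bool) (odd : Bool) (even : Bool) (front : Bool) (mid : Bool) (rear : Bool) (out : List Int) : Prop := out = generate_leg_set_alt right left odd even front mid rear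
instance (right : Bool) (left : Bool) (odd : Bool) (even : Bool) (front : Bool) (mid : Bool) (rear : Bool) (out : List Int) : Decidable (Spec_generate_leg_set right left odd even front mid rear out) := by unfold Spec_generate_leg_set; infer_instance

-- ===== CLAIM (what is proved, stated in full; the proofs are below) =====
def Claim_equal_generate_leg_set : Prop := ∀ (right : Bool) (left : Bool) (odd : Bool) (even : Bool) (front : Bool) (mid : Bool) (rear : Bool), Dom_generate_leg_set right left odd even front mid rear → Spec_generate_leg_set right left odd even front mid rear (generate_leg_set right left odd even front mid rear)

-- ===== LEMMAS AND PROOFS =====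

-- ===== VERDICT (by name: the statement is the Claim_ definition above) =====
theorem generate_leg_set_spec : Claim_equal_generate_leg_set := by
  unfold Claim_equal_generate_leg_set
  decide
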